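-- pv_equiv track=rewrite | github.com/tirthsh/Coding_Practice_Questions | arrays/practice_questions/zig_zag_finder.py | solution
-- ===== SOURCE A (Python) =====
-- def solution(numbers):
--     '''
--     input -> list of numbers, n
--     output -> list of numbers results, len(results) = len(n) - 2
--     assumptions -> length of n >= 3, n[i] >= 1
--     edge cases ->
--         1) len(n) = 3 -> base case
--     '''
--
--     results = []
--     end = 2
--
--     def isZigZag(end, numbers):
--         num1 = numbers[end-2]
--         num2 = numbers[end-1]
--         num3 = numbers[end]
--
--         if num1 < num2 and num2 > num3:
--             return 1
--
--         if num1 > num2 and num2 < num3: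
--             return 1
--
--         return 0
--
--
--     while end < len(numbers):
--         results.append(isZigZag(end, numbers))
--         end += 1
--
--     return results
-- ===== SOURCE B (Python) =====
-- def solution(numbers):
--     signs = [(numbers[i] < numbers[i + 1]) - (numbers[i] > numbers[i + 1])
--              for i in range(len(numbers) - 1)]
--     return [1 if signs[i] * signs[i + 1] == -1 else 0
--             for i in range(len(signs) - 1)]
-- ===== Notes on version B (the rewrite author's own statement) =====
-- stated objective: alternative
-- what changed: Replaces the while-loop over consecutive triples with two comprehension passes: a direction (sign) table over consecutive pairs, then a scan of adjacent sign pairs testing for an opposite-sign product of -1.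
import Mathlib
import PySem

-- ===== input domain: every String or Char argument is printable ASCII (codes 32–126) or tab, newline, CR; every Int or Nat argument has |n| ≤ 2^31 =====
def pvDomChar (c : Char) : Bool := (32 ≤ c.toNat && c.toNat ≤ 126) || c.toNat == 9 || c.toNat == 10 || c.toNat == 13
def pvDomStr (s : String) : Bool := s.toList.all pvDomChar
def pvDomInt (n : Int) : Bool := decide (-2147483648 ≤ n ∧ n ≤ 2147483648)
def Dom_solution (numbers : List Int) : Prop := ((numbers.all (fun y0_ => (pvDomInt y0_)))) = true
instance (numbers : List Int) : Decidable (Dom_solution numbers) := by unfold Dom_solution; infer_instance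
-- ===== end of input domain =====

-- B replaces A's triple-scan while-loop by a pair-sign table plus an adjacent-sign-product scan (alternative decomposition, same cost).


-- ===== PORT A =====
-- isZigZag(end, numbers): the three indices end-2, end-1, end are always in range in A's loop
def isZigZag (e : Int) (numbers : List Int) : Int :=
  let num1 := PySem.List.pyGetD numbers (e - 2) 0
  let num2 := PySem.List.pyGetD numbers (e - 1) 0
  let num3 := PySem.List.pyGetD numbers e 0
  if num1 < num2 ∧ num2 > num3 then 1
  else if num1 > num2 ∧ num2 < num3 then 1
  else 0

-- while end < len(numbers): results.append(isZigZag(end, numbers)); end += 1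
def solution (numbers : List Int) : List Int :=
  (PySem.List.pyRange 2 (numbers.length : Int) 1).foldl
    (fun results e => results ++ [isZigZag e numbers]) []

-- ===== PORT B =====
def solution_alt (numbers : List Int) : List Int :=
  let signs : List Int :=
    (PySem.List.pyRange 0 ((numbers.length : Int) - 1) 1).map
      (fun i => (if PySem.List.pyGetD numbers i 0 < PySem.List.pyGetD numbers (i + 1) 0 then 1 else 0)
              - (if PySem.List.pyGetD numbers i 0 > PySem.List.pyGetD numbers (i + 1) 0 then 1 else 0))
  (PySem.List.pyRange 0 ((signs.length : Int) - 1) 1).map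
    (fun i => if PySem.List.pyGetD signs i 0 * PySem.List.pyGetD signs (i + 1) 0 = -1 then 1 else 0)

-- ===== PRECONDITION & SPEC =====
def Spec_solution (numbers : List Int) (out : List Int) : Prop := out = solution_alt numbers
instance (numbers : List Int) (out : List Int) : Decidable (Spec_solution numbers out) := by unfold Spec_solution; infer_instance

-- ===== CLAIM (what is proved, stated in full; the proofs are below) =====
def Claim_equal_solution : Prop := ∀ (numbers : List Int), Dom_solution numbers → Spec_solution numbers (solution numbers)

-- ===== LEMMAS AND PROOFS =====

-- the pair-sign of B, for reasoning (not used by the ports)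
def sgf (numbers : List Int) (i : Int) : Int :=
  (if PySem.List.pyGetD numbers i 0 < PySem.List.pyGetD numbers (i + 1) 0 then 1 else 0)
  - (if PySem.List.pyGetD numbers i 0 > PySem.List.pyGetD numbers (i + 1) 0 then 1 else 0)

-- pointwise core: the triple test equals the opposite-sign product test
theorem zig_core (a b c : Int) :
    (if a < b ∧ b > c then (1:Int) else if a > b ∧ b < c then 1 else 0)
      = (if ((if a < b then (1:Int) else 0) - (if a > b then 1 else 0))
            * ((if b < c then (1:Int) else 0) - (if b > c then 1 else 0)) = -1 then 1 else 0) := by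
  rcases lt_trichotomy a b with h1 | h1 | h1 <;>
    rcases lt_trichotomy b c with h2 | h2 | h2 <;>
      simp [h1, h2, not_lt_of_gt]

theorem solution_eq_map (numbers : List Int) :
    solution numbers
      = (PySem.List.pyRange 2 (numbers.length : Int) 1).map (fun e => isZigZag e numbers) := by
  unfold solution
  rw [PySem.List.foldl_append_singleton_eq_map]
  simp

theorem alt_eq_map (numbers : List Int) :
    solution_alt numbers
      = (PySem.List.pyRange 0 ((numbers.length : Int) - 2) 1).map
          (fun i => if sgf numbers i * sgf numbers (i + 1) = -1 then (1:Int) else 0) := by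
  unfold solution_alt
  show (PySem.List.pyRange 0
      ((((PySem.List.pyRange 0 ((numbers.length : Int) - 1) 1).map _).length : Int) - 1) 1).map _ = _
  have hsl : ((PySem.List.pyRange 0 ((numbers.length : Int) - 1) 1).map
      (fun i => (if PySem.List.pyGetD numbers i 0 < PySem.List.pyGetD numbers (i + 1) 0 then (1:Int) else 0)
              - (if PySem.List.pyGetD numbers i 0 > PySem.List.pyGetD numbers (i + 1) 0 then 1 else 0))).length
      = ((numbers.length : Int) - 1).toNat := by
    simp [PySem.List.length_pyRange_one]
  rw [hsl]
  rcases Nat.eq_zero_or_pos numbers.length with h0 | hpos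
  · have hnil : numbers = [] := List.length_eq_zero_iff.mp h0
    subst hnil
    decide
  · have hb : ((((numbers.length : Int) - 1).toNat : Int) - 1) = (numbers.length : Int) - 2 := by
      omega
    rw [hb]
    apply List.map_congr_left
    intro i hi
    rw [PySem.List.mem_pyRange_one] at hi
    have g1 : PySem.List.pyGetD ((PySem.List.pyRange 0 ((numbers.length : Int) - 1) 1).map
        (fun j => (if PySem.List.pyGetD numbers j 0 < PySem.List.pyGetD numbers (j + 1) 0 then (1:Int) else 0)
                - (if PySem.List.pyGetD numbers j 0 > PySem.List.pyGetD numbers (j + 1) 0 then 1 else 0))) i 0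
        = sgf numbers i :=
      PySem.List.pyGetD_map_pyRange_of_nonneg _ _ i 0 (by omega) (by omega)
    have g2 : PySem.List.pyGetD ((PySem.List.pyRange 0 ((numbers.length : Int) - 1) 1).map
        (fun j => (if PySem.List.pyGetD numbers j 0 < PySem.List.pyGetD numbers (j + 1) 0 then (1:Int) else 0)
                - (if PySem.List.pyGetD numbers j 0 > PySem.List.pyGetD numbers (j + 1) 0 then 1 else 0))) (i + 1) 0
        = sgf numbers (i + 1) :=
      PySem.List.pyGetD_map_pyRange_of_nonneg _ _ (i + 1) 0 (by omega) (by omega)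
    rw [g1, g2]

theorem solution_spec' (numbers : List Int) : solution numbers = solution_alt numbers := by
  rw [solution_eq_map, alt_eq_map]
  rw [PySem.List.pyRange_one 2 (numbers.length : Int),
      PySem.List.pyRange_one 0 ((numbers.length : Int) - 2)]
  rw [List.map_map, List.map_map]
  have hlen : ((numbers.length : Int) - 2 - 0) = ((numbers.length : Int) - 2) := by ring
  rw [hlen]
  apply List.map_congr_left
  intro k hk
  simp only [Function.comp]
  have e0 : (2 : Int) + (k : Int) - 2 = (k : Int) := by ring
  have e1 : (2 : Int) + (k : Int) - 1 = (k : Int) + 1 := by ring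
  have e2 : (2 : Int) + (k : Int) = ((k : Int) + 1) + 1 := by ring
  unfold isZigZag sgf
  simp only [zero_add, e2,
    show ((k : Int) + 1) + 1 - 2 = (k : Int) from by ring,
    show ((k : Int) + 1) + 1 - 1 = (k : Int) + 1 from by ring]
  exact zig_core _ _ _

-- ===== VERDICT (by name: the statement is the Claim_ definition above) =====
theorem solution_spec : Claim_equal_solution := by
  intro numbers _
  unfold Spec_solution
  exact solution_spec' numbers
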